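-- pv_equiv track=rewrite | github.com/pypi-data/pypi-mirror-237 | packages/cyte/cyte-0.1.3.tar.gz/cyte-0.1.3/lovely/structures/cyte/FOOD/USDA/struct_2/packageWeight/interpret/__init__.py | SPLIT_LABEL
-- ===== SOURCE A (Python) =====
-- def SPLIT_LABEL (LABEL):
-- 	ONE = ""
-- 	TWO = ""
--
-- 	PART_2 = False
--
-- 	SELECTOR = 0
-- 	LAST_INDEX = len (LABEL) - 1
-- 	while (SELECTOR <= LAST_INDEX):
-- 		CHARACTER = LABEL [SELECTOR]
--
-- 		print ("CHARACTER:", CHARACTER)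
--
-- 		if (CHARACTER == " "):
-- 			SELECTOR += 1
-- 			break;
-- 		else:
-- 			ONE += CHARACTER
--
--
-- 		SELECTOR += 1
--
--
-- 	while (SELECTOR <= LAST_INDEX):
-- 		CHARACTER = LABEL [SELECTOR]
-- 		TWO += CHARACTER
-- 		SELECTOR += 1
--
-- 	return [ ONE.lower (), TWO.lower () ]
-- ===== SOURCE B (Python) =====
-- def SPLIT_LABEL(LABEL):
--     idx = LABEL.find(' ')
--     if idx == -1:
--         for CHARACTER in LABEL:
--             print("CHARACTER:", CHARACTER)
--         return [LABEL.lower(), ""]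
--     for CHARACTER in LABEL[:idx + 1]:
--         print("CHARACTER:", CHARACTER)
--     return [LABEL[:idx].lower(), LABEL[idx + 1:].lower()]
-- ===== Notes on version B (the rewrite author's own statement) =====
-- stated objective: simpler
-- what changed: A's two manual index-driven while loops (one accumulating ONE via repeated string concatenation, one copying TWO character by character) are replaced by a single str.find for the first space followed by slicing, with one print-only pass over the scanned prefix.
import Mathlib
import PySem

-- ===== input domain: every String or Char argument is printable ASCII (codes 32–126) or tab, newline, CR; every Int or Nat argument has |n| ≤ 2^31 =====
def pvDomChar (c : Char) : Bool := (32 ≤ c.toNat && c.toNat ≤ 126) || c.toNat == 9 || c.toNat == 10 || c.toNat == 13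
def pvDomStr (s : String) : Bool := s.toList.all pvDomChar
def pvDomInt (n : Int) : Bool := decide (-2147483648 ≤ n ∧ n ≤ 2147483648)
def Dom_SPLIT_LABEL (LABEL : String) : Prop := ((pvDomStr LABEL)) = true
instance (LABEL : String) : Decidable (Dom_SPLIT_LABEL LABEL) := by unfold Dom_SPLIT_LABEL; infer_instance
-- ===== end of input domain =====

-- B replaces A's two manual index-driven while loops with a single find(' ') plus slicing (simpler decomposition).


-- ===== PORT A =====
-- A's first while loop: scan characters, accumulate ONE until a space is hit (the space is
-- skipped); returns (ONE, remaining characters).  A's second while loop just copies the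
-- remaining characters into TWO, so it is the identity on the returned rest.
-- (print side effects are not modelled; the equivalence is about the return value)
def pvScanA : List Char → List Char → List Char × List Char
  | [], one => (one, [])
  | c :: rest, one => if c = ' ' then (one, rest) else pvScanA rest (one ++ [c])

def SPLIT_LABEL (LABEL : String) : List String :=
  let p := pvScanA LABEL.toList []
  [String.ofList (PySem.Chars.lower p.1), String.ofList (PySem.Chars.lower p.2)]

-- ===== PORT B =====
def SPLIT_LABEL_alt (LABEL : String) : List String :=
  let idx := PySem.Str.find LABEL " "
  if idx = -1 then
    [String.ofList (PySem.Chars.lower LABEL.toList), ""]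
  else
    [String.ofList (PySem.Chars.lower (PySem.List.slice LABEL.toList none (some idx))),
     String.ofList (PySem.Chars.lower (PySem.List.slice LABEL.toList (some (idx + 1)) none))]

-- ===== PRECONDITION & SPEC =====
def Spec_SPLIT_LABEL (LABEL : String) (out : List String) : Prop := out = SPLIT_LABEL_alt LABEL
instance (LABEL : String) (out : List String) : Decidable (Spec_SPLIT_LABEL LABEL out) := by unfold Spec_SPLIT_LABEL; infer_instance

-- ===== CLAIM (what is proved, stated in full; the proofs are below) =====
def Claim_equal_SPLIT_LABEL : Prop := ∀ (LABEL : String), Dom_SPLIT_LABEL LABEL → Spec_SPLIT_LABEL LABEL (SPLIT_LABEL LABEL)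

-- ===== LEMMAS AND PROOFS =====

-- A's scan returns (acc ++ prefix before first space, suffix after first space).
theorem pvScanA_eq (cs acc : List Char) :
    pvScanA cs acc = (acc ++ cs.takeWhile (· ≠ ' '), (cs.dropWhile (· ≠ ' ')).tail) := by
  induction cs generalizing acc with
  | nil => simp [pvScanA]
  | cons c rest ih =>
    by_cases h : c = ' '
    · simp [pvScanA, h]
    · simp [pvScanA, h, ih (acc ++ [c])]

-- find.go for the single-character needle ' ' : index of the first space found at offset k.
theorem findgo_space (cs : List Char) (k : Nat) :
    PySem.Chars.find.go [' '] cs k =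
      if ' ' ∈ cs then ((k + (cs.takeWhile (· ≠ ' ')).length : Nat) : Int) else -1 := by
  induction cs generalizing k with
  | nil => simp [PySem.Chars.find.go]
  | cons c rest ih =>
    by_cases h : c = ' '
    · simp [PySem.Chars.find.go, List.isPrefixOf, h]
    · have hp : ¬ ([' '].isPrefixOf (c :: rest) = true) := by
        simp [List.isPrefixOf]
        exact fun he => (h he.symm).elim
      simp only [PySem.Chars.find.go, if_neg hp, ih (k + 1), List.takeWhile_cons,
        List.mem_cons]
      have hne : ¬ (' ' = c) := fun he => h he.symm
      simp [hne, h]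
      split_ifs with hm
      · ring
      · rfl

theorem SPLIT_LABEL_eq_alt (LABEL : String) :
    SPLIT_LABEL LABEL = SPLIT_LABEL_alt LABEL := by
  unfold SPLIT_LABEL SPLIT_LABEL_alt
  have hfind : PySem.Str.find LABEL " " = PySem.Chars.find LABEL.toList [' '] := by
    simp [PySem.Str.find]
  rw [pvScanA_eq]
  set cs := LABEL.toList with hcs
  set tw := cs.takeWhile (· ≠ ' ') with htw
  set dw := cs.dropWhile (· ≠ ' ') with hdw
  have hsplit : tw ++ dw = cs := List.takeWhile_append_dropWhile
  by_cases hmem : ' ' ∈ cs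
  · -- a space exists: find returns the length of the space-free prefix
    have hfk : PySem.Chars.find cs [' '] = (tw.length : Int) := by
      simp [PySem.Chars.find, findgo_space, hmem, htw]
    rw [hfind, hfk, if_neg (by omega)]
    rw [PySem.List.slice_to cs (by positivity)]
    rw [PySem.List.slice_from cs (by positivity)]
    have h1 : cs.take ((tw.length : Int)).toNat = tw := by
      rw [Int.toNat_natCast]
      conv_lhs => rw [← hsplit]
      exact List.take_left
    have h2 : cs.drop (((tw.length : Int)) + 1).toNat = dw.tail := by
      have ht : (((tw.length : Int)) + 1).toNat = tw.length + 1 := by omega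
      rw [ht, ← List.drop_drop]
      conv_lhs => rw [← hsplit]
      rw [List.drop_left, List.drop_one]
    rw [h1, h2]
    simp
  · -- no space: find = -1, ONE is the whole string, TWO stays empty
    have hfk : PySem.Chars.find cs [' '] = -1 := by
      simp [PySem.Chars.find, findgo_space, hmem]
    rw [hfind, hfk, if_pos rfl]
    have h1 : tw = cs := by
      rw [htw, List.takeWhile_eq_self_iff]
      intro x hx; simp; intro he; exact hmem (he ▸ hx)
    have h2 : dw = [] := by
      rw [hdw, List.dropWhile_eq_nil_iff]
      intro x hx; simp; intro he; exact hmem (he ▸ hx)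
    rw [h1, h2]
    simp [PySem.Chars.lower, show String.ofList ([] : List Char) = "" from by decide]

-- ===== VERDICT (by name: the statement is the Claim_ definition above) =====
theorem SPLIT_LABEL_spec : Claim_equal_SPLIT_LABEL := by
  intro LABEL _
  unfold Spec_SPLIT_LABEL
  exact SPLIT_LABEL_eq_alt LABEL
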